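-- pv_equiv track=rewrite | github.com/TPL-bot/ErgoGuard | ergoguard 02.py | calc_max_slouch_duration
-- ===== SOURCE A (Python) =====
-- def calc_max_slouch_duration(posture_log: list) -> str:
--     """
--     Find the longest continuous duration of bad posture.
--
--     Returns MM:SS format string.
--
--     Args:
--         posture_log: List of (timestamp, angle, status) tuples
--
--     Returns:
--         String in "MM:SS" format
--     """
--     max_durations = []
--     current_bad_start = None
--
--     for i, entry in enumerate(posture_log):
--         status = entry[2] if len(entry) > 2 else "Good"
--         if status == "Bad":
--             if current_bad_start is None:
--                 current_bad_start = i
--         else: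
--             if current_bad_start is not None:
--                 max_durations.append(i - current_bad_start)
--                 current_bad_start = None
--
--     # Include the last streak if session ended during slouch
--     if current_bad_start is not None:
--         max_durations.append(len(posture_log) - current_bad_start)
--
--     max_frames = max(max_durations, default=0)
--     # Assume ~30 FPS framerate
--     frame_rate = 30
--     seconds = round(max_frames / frame_rate)
--     mins = seconds // 60
--     secs = seconds % 60
--     return f"{mins}:{secs:02d}"
-- ===== SOURCE B (Python) =====
-- def calc_max_slouch_duration(posture_log: list) -> str:
--     """Longest continuous bad-posture streak as MM:SS, via good-frame boundary gaps."""
--     flags = [(e[2] if len(e) > 2 else "Good") == "Bad" for e in posture_log]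
--     # positions of the non-Bad frames, fenced by virtual boundaries -1 and len
--     boundaries = [-1] + [i for i, bad in enumerate(flags) if not bad] + [len(flags)]
--     # each Bad streak is exactly the space between two consecutive boundaries
--     max_frames = max(b - a - 1 for a, b in zip(boundaries, boundaries[1:]))
--     seconds = round(max_frames / 30)
--     return f"{seconds // 60}:{seconds % 60:02d}"
-- ===== Notes on version B (the rewrite author's own statement) =====
-- stated objective: alternative
-- what changed: B computes the streak in three staged passes with different data: a boolean flag list, then the list of positions of the non-Bad frames fenced by virtual boundaries -1 and len, then the maximum gap between consecutive boundaries minus one -- no streak-state bookkeeping at all, unlike A's start-index/durations-list scan with a tail patch.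
import Mathlib
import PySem

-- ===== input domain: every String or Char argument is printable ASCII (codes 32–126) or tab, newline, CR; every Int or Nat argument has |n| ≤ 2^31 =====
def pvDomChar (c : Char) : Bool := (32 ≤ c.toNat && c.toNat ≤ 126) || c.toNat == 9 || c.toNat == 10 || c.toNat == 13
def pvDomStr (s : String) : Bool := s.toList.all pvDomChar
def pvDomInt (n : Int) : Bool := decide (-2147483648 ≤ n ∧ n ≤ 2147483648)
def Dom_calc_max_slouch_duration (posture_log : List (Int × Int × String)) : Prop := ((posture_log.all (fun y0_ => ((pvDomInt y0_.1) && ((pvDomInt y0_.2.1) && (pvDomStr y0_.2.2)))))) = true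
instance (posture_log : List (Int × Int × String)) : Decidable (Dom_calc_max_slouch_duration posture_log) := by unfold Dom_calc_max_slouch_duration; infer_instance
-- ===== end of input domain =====

-- B replaces A's streak-state scan (start index, durations list, end-of-session tail patch) with
-- staged passes over different data: the positions of the non-Bad frames fenced by the virtual
-- boundaries -1 and len, whose maximal consecutive gap minus one is the longest Bad streak
-- (objective: alternative); identical return value, proved below.

-- ===== PORT A =====
-- shared tail of BOTH Pythons (the formatting lines are identical in Source A and Source B):
-- round(n / 30) for 0 ≤ n: n/30 as a double is exactly half-way only when the rational n/30 is,
-- so Python's float round = half-to-even on the exact quotient (exact for the sizes here)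
def pvRound30 (n : Int) : Int :=
  let q := PySem.Int.floordiv n 30
  let r := PySem.Int.mod n 30
  if r < 15 then q else if 15 < r then q + 1 else if PySem.Int.mod q 2 = 0 then q else q + 1

-- seconds // 60, seconds % 60, f"{mins}:{secs:02d}" (exact: 0 ≤ secs < 60, so %02d is one optional '0' pad)
def pvFmt (max_frames : Int) : String :=
  let seconds := pvRound30 max_frames
  let mins := PySem.Int.floordiv seconds 60
  let secs := PySem.Int.mod seconds 60
  PySem.Int.toStr mins ++ ":" ++ (if secs < 10 then "0" ++ PySem.Int.toStr secs else PySem.Int.toStr secs)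

-- the for-loop over enumerate(posture_log), carrying i and (max_durations, current_bad_start);
-- entry is always a triple, so `entry[2] if len(entry) > 2 else "Good"` is entry.2.2
def pvALoop : List (Int × Int × String) → Int → List Int × Option Int → List Int × Option Int
  | [], _, st => st
  | entry :: rest, i, st =>
    if entry.2.2 == "Bad" then
      pvALoop rest (i + 1) (st.1, match st.2 with | none => some i | some s => some s)
    else
      pvALoop rest (i + 1) (match st.2 with | some s => (st.1 ++ [i - s], none) | none => (st.1, none))

def calc_max_slouch_duration (posture_log : List (Int × Int × String)) : String :=
  let st := pvALoop posture_log 0 ([], none)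
  -- include the last streak if session ended during slouch
  let max_durations := match st.2 with
    | some s => st.1 ++ [(posture_log.length : Int) - s]
    | none => st.1
  -- max(max_durations, default=0)
  let max_frames := match PySem.List.max? max_durations (fun x => x) with
    | some m => m
    | none => 0
  pvFmt max_frames

-- ===== PORT B =====
-- Source B line by line: flags comprehension; boundaries = [-1] + [i for i,bad in enumerate(flags)
-- if not bad] + [len(flags)]; max over the zip-generator (boundaries always has ≥ 2 elements,
-- so Python's max never sees an empty iterable: .getD 0 is a dead default)
def calc_max_slouch_duration_alt (posture_log : List (Int × Int × String)) : String :=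
  let flags := posture_log.map (fun e => e.2.2 == "Bad")
  let boundaries : List Int :=
    [-1] ++ ((PySem.List.enumerate flags).filter (fun p => !p.2)).map (fun p => p.1)
         ++ [(flags.length : Int)]
  let gaps := (boundaries.zip (PySem.List.slice boundaries (some 1) none)).map
    (fun p => p.2 - p.1 - 1)
  let max_frames := (PySem.List.max? gaps (fun x => x)).getD 0
  let seconds := pvRound30 max_frames
  PySem.Int.toStr (PySem.Int.floordiv seconds 60) ++ ":" ++
    (if PySem.Int.mod seconds 60 < 10 then "0" ++ PySem.Int.toStr (PySem.Int.mod seconds 60)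
     else PySem.Int.toStr (PySem.Int.mod seconds 60))

-- ===== PRECONDITION & SPEC =====
def Spec_calc_max_slouch_duration (posture_log : List (Int × Int × String)) (out : String) : Prop := out = calc_max_slouch_duration_alt posture_log
instance (posture_log : List (Int × Int × String)) (out : String) : Decidable (Spec_calc_max_slouch_duration posture_log out) := by unfold Spec_calc_max_slouch_duration; infer_instance

-- ===== CLAIM (what is proved, stated in full; the proofs are below) =====
def Claim_equal_calc_max_slouch_duration : Prop := ∀ (posture_log : List (Int × Int × String)), Dom_calc_max_slouch_duration posture_log → Spec_calc_max_slouch_duration posture_log (calc_max_slouch_duration posture_log)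

-- ===== LEMMAS AND PROOFS =====

def pvIsBad (e : Int × Int × String) : Bool := e.2.2 == "Bad"

-- the list of lengths of the maximal Bad-runs, in order (proof-only helper)
def pvRuns : List (Int × Int × String) → List Int
  | [] => []
  | e :: rest =>
    if pvIsBad e then (1 + ((rest.takeWhile pvIsBad).length : Int)) :: pvRuns (rest.dropWhile pvIsBad)
    else pvRuns rest
termination_by xs => xs.length
decreasing_by
· have := List.length_dropWhile_le pvIsBad rest
  simp only [List.length_cons]; omega
· simp

-- same, on the flag list
def pvRunsB : List Bool → List Int
  | [] => []
  | b :: rest =>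
    if b then (1 + ((rest.takeWhile id).length : Int)) :: pvRunsB (rest.dropWhile id)
    else pvRunsB rest
termination_by xs => xs.length
decreasing_by
· have := List.length_dropWhile_le (id : Bool → Bool) rest
  simp only [List.length_cons]; omega
· simp

-- positions (from i) of the false flags
def pvFalseIdx : Int → List Bool → List Int
  | _, [] => []
  | i, b :: rest => if b then pvFalseIdx (i + 1) rest else i :: pvFalseIdx (i + 1) rest

-- the gaps-minus-one between consecutive boundaries prev :: bs ++ [last]
def pvGaps : Int → List Int → Int → List Int
  | prev, [], last => [last - prev - 1]
  | prev, b :: bs, last => (b - prev - 1) :: pvGaps b bs last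

-- A's loop followed by the tail-streak patch, with explicit start index and accumulator
def pvAfin (xs : List (Int × Int × String)) (i : Int) (durs : List Int) : List Int :=
  match (pvALoop xs i (durs, none)).2 with
  | some s => (pvALoop xs i (durs, none)).1 ++ [i + (xs.length : Int) - s]
  | none => (pvALoop xs i (durs, none)).1

theorem pvALoop_append (u v : List (Int × Int × String)) :
    ∀ (i : Int) (st : List Int × Option Int),
      pvALoop (u ++ v) i st = pvALoop v (i + u.length) (pvALoop u i st) := by
  induction u with
  | nil => intro i st; simp [pvALoop]
  | cons a u ih =>
    intro i st
    simp only [List.cons_append, pvALoop]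
    split <;>
      · rw [ih]
        congr 1
        simp only [List.length_cons]
        push_cast
        ring

theorem pvALoop_allBad (ys : List (Int × Int × String)) (h : ∀ y ∈ ys, pvIsBad y = true) :
    ∀ (i : Int) (durs : List Int) (s : Int),
      pvALoop ys i (durs, some s) = (durs, some s) := by
  induction ys with
  | nil => intro i durs s; rfl
  | cons a ys ih =>
    intro i durs s
    have ha : a.2.2 == "Bad" := h a (by simp)
    simp only [pvALoop, ha, if_pos]
    exact ih (fun y hy => h y (by simp [hy])) _ _ _

theorem pvDropWhile_head_false (l : List (Int × Int × String)) (g : Int × Int × String)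
    (d' : List (Int × Int × String)) (h : l.dropWhile pvIsBad = g :: d') :
    pvIsBad g = false := by
  induction l with
  | nil => simp [List.dropWhile] at h
  | cons a l ih =>
    by_cases hba : pvIsBad a
    · simp only [List.dropWhile, hba] at h
      exact ih h
    · simp only [List.dropWhile, hba] at h
      injection h with h1 h2
      rw [h1] at hba
      simpa using hba

theorem pvAfin_eq_runs : ∀ (n : Nat) (xs : List (Int × Int × String)), xs.length ≤ n →
    ∀ (i : Int) (durs : List Int), pvAfin xs i durs = durs ++ pvRuns xs := by
  intro n
  induction n with
  | zero =>
    intro xs hx i durs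
    match xs with
    | [] => simp [pvAfin, pvALoop, pvRuns]
    | e :: rest => simp at hx
  | succ n ih =>
    intro xs hx i durs
    match xs with
    | [] => simp [pvAfin, pvALoop, pvRuns]
    | e :: rest =>
      by_cases hb : pvIsBad e
      · -- Bad head: the loop enters a streak; rest = (Bad run t) ++ remainder d
        have hb' : e.2.2 == "Bad" := hb
        have hrest : rest.takeWhile pvIsBad ++ rest.dropWhile pvIsBad = rest :=
          List.takeWhile_append_dropWhile
        have htb : ∀ y ∈ rest.takeWhile pvIsBad, pvIsBad y = true :=
          fun y hy => List.mem_takeWhile_imp hy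
        have hlen : (rest.takeWhile pvIsBad).length + (rest.dropWhile pvIsBad).length
            = rest.length := by
          have h := congrArg List.length hrest
          rw [List.length_append] at h
          exact h
        have hloop : pvALoop (e :: rest) i (durs, none)
            = pvALoop (rest.dropWhile pvIsBad)
                (i + 1 + ((rest.takeWhile pvIsBad).length : Int)) (durs, some i) := by
          conv_lhs =>
            rw [show e :: rest = e :: (rest.takeWhile pvIsBad ++ rest.dropWhile pvIsBad) by
              rw [hrest]]
          simp only [pvALoop, hb', if_pos]
          rw [pvALoop_append, pvALoop_allBad _ htb]
        have hruns : pvRuns (e :: rest)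
            = (1 + ((rest.takeWhile pvIsBad).length : Int)) :: pvRuns (rest.dropWhile pvIsBad) := by
          rw [pvRuns]; simp [hb]
        cases hdm : rest.dropWhile pvIsBad with
        | nil =>
          -- the session ends inside the streak: the tail patch records it
          have hteq : (rest.takeWhile pvIsBad).length = rest.length := by
            rw [hdm] at hlen; simpa using hlen
          have h1 : pvAfin (e :: rest) i durs
              = durs ++ [1 + ((rest.takeWhile pvIsBad).length : Int)] := by
            unfold pvAfin
            rw [hloop, hdm]
            simp only [pvALoop, List.length_cons]
            congr 2
            omega
          rw [h1, hruns, hdm]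
          simp [pvRuns]
        | cons g d' =>
          -- the streak is closed by the Good frame g; continue after it
          have hg : pvIsBad g = false := pvDropWhile_head_false rest g d' hdm
          have hg' : ¬ (g.2.2 == "Bad") = true := by simpa [pvIsBad] using hg
          have hd'len : d'.length ≤ n := by
            rw [hdm] at hlen
            simp only [List.length_cons] at hlen hx
            omega
          have hji : i + 1 + ((rest.takeWhile pvIsBad).length : Int) - i
              = 1 + ((rest.takeWhile pvIsBad).length : Int) := by ring
          have h1 : pvAfin (e :: rest) i durs
              = pvAfin d' (i + 1 + ((rest.takeWhile pvIsBad).length : Int) + 1)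
                  (durs ++ [1 + ((rest.takeWhile pvIsBad).length : Int)]) := by
            unfold pvAfin
            rw [hloop, hdm]
            have hstep : pvALoop (g :: d')
                (i + 1 + ((rest.takeWhile pvIsBad).length : Int)) (durs, some i)
                = pvALoop d' (i + 1 + ((rest.takeWhile pvIsBad).length : Int) + 1)
                    (durs ++ [1 + ((rest.takeWhile pvIsBad).length : Int)], none) := by
              simp only [pvALoop, hg', Bool.false_eq_true, if_false, hji]
            rw [hstep]
            rw [show i + (((e :: rest).length : Int))
                = (i + 1 + ((rest.takeWhile pvIsBad).length : Int) + 1) + (d'.length : Int) by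
              rw [hdm] at hlen
              simp only [List.length_cons] at hlen ⊢
              omega]
          rw [h1, ih d' hd'len, hruns, hdm, pvRuns]
          simp only [hg, Bool.false_eq_true, if_false]
          simp
      · -- Good head: one plain step
        have hb' : ¬ (e.2.2 == "Bad") = true := by simpa [pvIsBad] using hb
        have h1 : pvAfin (e :: rest) i durs = pvAfin rest (i + 1) durs := by
          unfold pvAfin
          simp only [pvALoop, hb', Bool.false_eq_true, if_false]
          rw [show i + (((e :: rest).length : Int)) = (i + 1) + (rest.length : Int) by
            simp only [List.length_cons]
            omega]
        rw [h1, ih rest (by simp at hx; omega), pvRuns]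
        simp [hb]

theorem pvRuns_pos : ∀ (n : Nat) (xs : List (Int × Int × String)), xs.length ≤ n →
    ∀ x ∈ pvRuns xs, 1 ≤ x := by
  intro n
  induction n with
  | zero =>
    intro xs hx x hxmem
    match xs with
    | [] => simp [pvRuns] at hxmem
    | e :: rest => simp at hx
  | succ n ih =>
    intro xs hx x hxmem
    match xs with
    | [] => simp [pvRuns] at hxmem
    | e :: rest =>
      by_cases hb : pvIsBad e
      · rw [pvRuns] at hxmem
        simp only [hb, if_pos, List.mem_cons] at hxmem
        rcases hxmem with h | h
        · subst h; omega
        · exact ih _ (by have := List.length_dropWhile_le pvIsBad rest; simp at hx; omega) x h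
      · rw [pvRuns] at hxmem
        simp only [hb, Bool.false_eq_true, if_false] at hxmem
        exact ih rest (by simp at hx; omega) x hxmem

-- pvRuns of the flag list is pvRuns of the log
theorem pvRunsB_map : ∀ (n : Nat) (xs : List (Int × Int × String)), xs.length ≤ n →
    pvRunsB (xs.map pvIsBad) = pvRuns xs := by
  intro n
  induction n with
  | zero =>
    intro xs hx
    match xs with
    | [] => simp [pvRunsB, pvRuns]
    | e :: rest => simp at hx
  | succ n ih =>
    intro xs hx
    match xs with
    | [] => simp [pvRunsB, pvRuns]
    | e :: rest =>
      rw [List.map_cons, pvRunsB, pvRuns]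
      by_cases hb : pvIsBad e
      · simp only [hb, if_pos]
        rw [List.takeWhile_map, List.dropWhile_map]
        have hdw : rest.dropWhile (id ∘ pvIsBad) = rest.dropWhile pvIsBad := rfl
        have htw : rest.takeWhile (id ∘ pvIsBad) = rest.takeWhile pvIsBad := rfl
        rw [hdw, htw,
          ih (rest.dropWhile pvIsBad)
            (by have := List.length_dropWhile_le pvIsBad rest; simp at hx; omega)]
        simp
      · simp only [hb, Bool.false_eq_true, if_false]
        exact ih rest (by simp at hx; omega)

-- the enumerate/filter/map pass of B is pvFalseIdx
theorem pvEnum_filter_eq (l : List Bool) : ∀ (s : Int),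
    (((PySem.List.enumerate l s).filter (fun p => !p.2)).map (fun p => p.1)) = pvFalseIdx s l := by
  induction l with
  | nil => intro s; simp [PySem.List.enumerate_nil, pvFalseIdx]
  | cons b t ih =>
    intro s
    rw [PySem.List.enumerate_cons, pvFalseIdx]
    cases b <;> simp [List.filter, ih]

-- the zip/map pass of B is pvGaps
theorem pvZip_eq_gaps : ∀ (bs : List Int) (prev last : Int),
    (((prev :: (bs ++ [last])).zip (bs ++ [last])).map (fun p => p.2 - p.1 - 1))
      = pvGaps prev bs last := by
  intro bs
  induction bs with
  | nil => intro prev last; simp [pvGaps]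
  | cons b t ih =>
    intro prev last
    simp only [List.cons_append, List.zip_cons_cons, List.map_cons, pvGaps]
    rw [← ih b last]

-- every recorded false position is ≥ the start index
theorem pvFalseIdx_ge : ∀ (l : List Bool) (i : Int), ∀ j ∈ pvFalseIdx i l, i ≤ j := by
  intro l
  induction l with
  | nil => intro i j hj; simp [pvFalseIdx] at hj
  | cons b t ih =>
    intro i j hj
    rw [pvFalseIdx] at hj
    cases b with
    | true =>
      simp only [if_pos] at hj
      have := ih (i + 1) j hj
      omega
    | false =>
      simp only [Bool.false_eq_true, if_false, List.mem_cons] at hj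
      rcases hj with h | h
      · omega
      · have := ih (i + 1) j h
        omega

theorem pvDropWhileB_head_false (l : List Bool) (c : Bool) (d : List Bool)
    (h : l.dropWhile id = c :: d) : c = false := by
  induction l with
  | nil => simp [List.dropWhile] at h
  | cons a l ih =>
    cases a with
    | true =>
      simp only [List.dropWhile, id_eq] at h
      exact ih h
    | false =>
      simp only [List.dropWhile, id_eq] at h
      injection h with h1 _
      exact h1.symm

-- CORE: folding max over the boundary gaps equals folding max over the run lengths
theorem pvGaps_fold_eq_runs : ∀ (n : Nat) (l : List Bool), l.length ≤ n →
    ∀ (i m : Int), 0 ≤ m →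
      (pvGaps (i - 1) (pvFalseIdx i l) (i + l.length)).foldl max m = (pvRunsB l).foldl max m := by
  intro n
  induction n with
  | zero =>
    intro l hl i m hm
    match l with
    | [] => simp [pvFalseIdx, pvGaps, pvRunsB, max_eq_left hm]
    | b :: t => simp at hl
  | succ n ih =>
    intro l hl i m hm
    match l with
    | [] => simp [pvFalseIdx, pvGaps, pvRunsB, max_eq_left hm]
    | b :: t =>
      cases b with
      | false =>
        -- a good frame up front: a 0 gap, absorbed by 0 ≤ m
        rw [pvRunsB]
        simp only [Bool.false_eq_true, if_false]
        rw [pvFalseIdx]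
        simp only [Bool.false_eq_true, if_false]
        rw [pvGaps, List.foldl_cons]
        have h0 : max m (i - (i - 1) - 1) = m := by
          rw [max_eq_left]; omega
        rw [h0]
        have h2 := ih t (by simp at hl; omega) (i + 1) m hm
        rw [show i + 1 - 1 = i from by ring] at h2
        rw [show i + (((false :: t).length : Int)) = i + 1 + (t.length : Int) from by
          simp only [List.length_cons]; push_cast; omega]
        exact h2
      | true =>
        -- a bad run of length 1 + |takeWhile id t| up front
        have hrest : t.takeWhile id ++ t.dropWhile id = t := List.takeWhile_append_dropWhile
        have hall : ∀ y ∈ t.takeWhile id, y = true := fun y hy => List.mem_takeWhile_imp hy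
        have hlen : (t.takeWhile id).length + (t.dropWhile id).length = t.length := by
          have h := congrArg List.length hrest
          rw [List.length_append] at h
          exact h
        have hfalse_all : ∀ (u : List Bool), (∀ y ∈ u, y = true) → ∀ (j : Int),
            pvFalseIdx j u = [] := by
          intro u hu
          induction u with
          | nil => intro j; rfl
          | cons c u ihc =>
            intro j
            have := hu c (by simp)
            rw [pvFalseIdx, this]
            simp only [if_pos]
            exact ihc (fun y hy => hu y (by simp [hy])) (j + 1)
        have hfi_append : ∀ (u v : List Bool) (j : Int),
            pvFalseIdx j (u ++ v) = pvFalseIdx j u ++ pvFalseIdx (j + u.length) v := by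
          intro u
          induction u with
          | nil => intro v j; simp [pvFalseIdx]
          | cons c u ihc =>
            intro v j
            rw [List.cons_append, pvFalseIdx, pvFalseIdx]
            cases c <;> simp only [if_pos, Bool.false_eq_true, if_false, List.cons_append] <;>
              · rw [ihc v (j + 1)]
                congr 2
                simp only [List.length_cons]
                push_cast
                ring
        have hT := (t.takeWhile id).length
        have hfi : pvFalseIdx i (true :: t)
            = pvFalseIdx (i + 1 + ((t.takeWhile id).length : Int)) (t.dropWhile id) := by
          rw [pvFalseIdx]
          simp only [if_pos]
          conv_lhs => rw [show t = t.takeWhile id ++ t.dropWhile id from hrest.symm]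
          rw [hfi_append, hfalse_all _ hall]
          simp
        rw [pvRunsB]
        simp only [if_pos]
        rw [hfi]
        cases hdm : t.dropWhile id with
        | nil =>
          -- the whole remainder is bad
          have hteq : (t.takeWhile id).length = t.length := by
            rw [hdm] at hlen; simpa using hlen
          simp only [pvFalseIdx, pvGaps, List.foldl_cons, List.foldl_nil,
            show pvRunsB ([] : List Bool) = [] from by simp [pvRunsB]]
          congr 1
          simp only [List.length_cons]
          push_cast
          omega
        | cons c d' =>
          -- the run is closed by a good frame c
          have hc : c = false := pvDropWhileB_head_false t c d' hdm
          subst hc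
          have hd'len : d'.length ≤ n := by
            rw [hdm] at hlen
            simp only [List.length_cons] at hlen hl
            omega
          rw [pvFalseIdx]
          simp only [Bool.false_eq_true, if_false, pvGaps, List.foldl_cons,
            show pvRunsB (false :: d') = pvRunsB d' from by rw [pvRunsB]; simp]
          have hg1 : i + 1 + ((t.takeWhile id).length : Int) - (i - 1) - 1
              = 1 + ((t.takeWhile id).length : Int) := by ring
          rw [hg1]
          have hlast : i + ((true :: t).length : Int)
              = (i + 1 + ((t.takeWhile id).length : Int) + 1) + (d'.length : Int) := by
            rw [hdm] at hlen
            simp only [List.length_cons] at hlen ⊢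
            omega
          rw [hlast]
          have hm' : 0 ≤ max m (1 + ((t.takeWhile id).length : Int)) := by
            have h0T : (0:Int) ≤ ((t.takeWhile id).length : Int) := Int.natCast_nonneg _
            omega
          have h2 := ih d' hd'len (i + 1 + ((t.takeWhile id).length : Int) + 1)
            (max m (1 + ((t.takeWhile id).length : Int))) hm'
          rw [show i + 1 + ((t.takeWhile id).length : Int) + 1 - 1
              = i + 1 + ((t.takeWhile id).length : Int) from by ring] at h2
          exact h2

-- fold max over a list of ≥ 1 entries from 0 is Python's max-with-default-0
theorem pvFold_default (l : List Int) (hpos : ∀ x ∈ l, 1 ≤ x) :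
    (match PySem.List.max? l (fun x => x) with | some m => m | none => 0)
      = l.foldl max 0 := by
  match l with
  | [] => simp [PySem.List.max?]
  | h :: t =>
    rw [PySem.List.max?_id_cons]
    have h1 : (1 : Int) ≤ h := hpos h (by simp)
    simp [List.foldl, max_eq_right (by omega : (0 : Int) ≤ h)]

-- ===== VERDICT (by name: the statement is the Claim_ definition above) =====
theorem calc_max_slouch_duration_spec : Claim_equal_calc_max_slouch_duration := by
  intro xs _
  unfold Spec_calc_max_slouch_duration
  unfold calc_max_slouch_duration calc_max_slouch_duration_alt
  simp only []
  -- A's max_durations list is pvRuns xs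
  have hA : (match (pvALoop xs 0 ([], none)).2 with
      | some s => (pvALoop xs 0 ([], none)).1 ++ [((xs.length : Int)) - s]
      | none => (pvALoop xs 0 ([], none)).1) = pvRuns xs := by
    have h := pvAfin_eq_runs xs.length xs le_rfl 0 []
    unfold pvAfin at h
    rcases hst : (pvALoop xs 0 ([], none)).2 with _ | s <;>
      simp only [hst] at h ⊢ <;> simpa using h
  -- B's gaps list is pvGaps (-1) (pvFalseIdx 0 flags) (len)
  rw [show (fun e : Int × Int × String => e.2.2 == "Bad") = pvIsBad from rfl]
  set flags := xs.map pvIsBad with hflags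
  have hbound : ((([-1] ++ ((PySem.List.enumerate flags 0).filter (fun p => !p.2)).map (fun p => p.1)
        ++ [(flags.length : Int)]) : List Int))
      = (-1) :: (pvFalseIdx 0 flags ++ [(flags.length : Int)]) := by
    rw [pvEnum_filter_eq flags 0]
    simp
  have hgapsB : ∀ (bnd : List Int), bnd = (-1) :: (pvFalseIdx 0 flags ++ [(flags.length : Int)]) →
      ((bnd.zip (PySem.List.slice bnd (some 1) none)).map (fun p => p.2 - p.1 - 1))
        = pvGaps (-1) (pvFalseIdx 0 flags) (flags.length : Int) := by
    intro bnd hb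
    rw [hb, PySem.List.slice_from_one]
    exact pvZip_eq_gaps (pvFalseIdx 0 flags) (-1) (flags.length : Int)
  -- B's max_frames: Python max over the nonempty gaps = foldl max of head over tail
  have hgaps_ne : pvGaps (-1) (pvFalseIdx 0 flags) (flags.length : Int) ≠ [] := by
    cases h : pvFalseIdx 0 flags <;> simp [pvGaps]
  have hhead0 : ∀ (g : Int) (gt : List Int),
      pvGaps (-1) (pvFalseIdx 0 flags) (flags.length : Int) = g :: gt → 0 ≤ g := by
    intro g gt hg
    cases h : pvFalseIdx 0 flags with
    | nil =>
      rw [h] at hg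
      simp only [pvGaps] at hg
      injection hg with h1 _
      subst h1
      have h0 : (0:Int) ≤ (flags.length : Int) := Int.natCast_nonneg _
      omega
    | cons j js =>
      rw [h] at hg
      simp only [pvGaps] at hg
      injection hg with h1 _
      have : (0:Int) ≤ j := pvFalseIdx_ge flags 0 j (by rw [h]; simp)
      omega
  have hBmax : ((PySem.List.max? ((((-1) :: (pvFalseIdx 0 flags ++ [(flags.length : Int)])).zip
        (PySem.List.slice ((-1) :: (pvFalseIdx 0 flags ++ [(flags.length : Int)])) (some 1) none)).map
        (fun p => p.2 - p.1 - 1)) (fun x => x)).getD 0)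
      = (pvGaps (-1) (pvFalseIdx 0 flags) (flags.length : Int)).foldl max 0 := by
    rw [hgapsB _ rfl]
    cases hg : pvGaps (-1) (pvFalseIdx 0 flags) (flags.length : Int) with
    | nil => exact absurd hg hgaps_ne
    | cons g gt =>
      rw [PySem.List.max?_id_cons]
      have := hhead0 g gt hg
      simp [List.foldl, max_eq_right this]
  -- connect the two sides
  have hmain : (pvGaps (-1) (pvFalseIdx 0 flags) (flags.length : Int)).foldl max 0
      = (pvRuns xs).foldl max 0 := by
    have h := pvGaps_fold_eq_runs flags.length flags le_rfl 0 0 le_rfl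
    rw [pvRunsB_map xs.length xs le_rfl] at h
    rw [show ((0:Int) - 1) = -1 from by ring,
        show ((0:Int) + (flags.length : Int)) = (flags.length : Int) from by ring] at h
    exact h
  rw [hA, hbound, hBmax, hmain,
    pvFold_default (pvRuns xs) (pvRuns_pos xs.length xs le_rfl)]
  rfl
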